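-- pv_equiv track=rewrite | github.com/qtpham1998/advent-of-code | 2021/Day08/eight.py | get_length_dict
-- ===== SOURCE A (Python) =====
-- def get_length_dict(patterns):
--     p_dicts = {}
--     for p in patterns:
--         if len(p) in p_dicts.keys():
--             p_dicts[len(p)].append(set(p))
--         else:
--             p_dicts[len(p)] = [set(p)]
--     return p_dicts
-- ===== SOURCE B (Python) =====
-- def get_length_dict(patterns):
--     # Two-pass grouping: collect the distinct lengths in first-occurrence order,
--     # then build each bucket by filtering the patterns of that length.
--     lengths = list(dict.fromkeys(len(p) for p in patterns))
--     return {l: [set(p) for p in patterns if len(p) == l] for l in lengths}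
-- ===== Notes on version B (the rewrite author's own statement) =====
-- stated objective: alternative
-- what changed: A buckets into a dict in one pass with per-key append/insert branching; B first collects the distinct lengths in first-occurrence order and then builds each bucket by a filtering scan per length.
import Mathlib
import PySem

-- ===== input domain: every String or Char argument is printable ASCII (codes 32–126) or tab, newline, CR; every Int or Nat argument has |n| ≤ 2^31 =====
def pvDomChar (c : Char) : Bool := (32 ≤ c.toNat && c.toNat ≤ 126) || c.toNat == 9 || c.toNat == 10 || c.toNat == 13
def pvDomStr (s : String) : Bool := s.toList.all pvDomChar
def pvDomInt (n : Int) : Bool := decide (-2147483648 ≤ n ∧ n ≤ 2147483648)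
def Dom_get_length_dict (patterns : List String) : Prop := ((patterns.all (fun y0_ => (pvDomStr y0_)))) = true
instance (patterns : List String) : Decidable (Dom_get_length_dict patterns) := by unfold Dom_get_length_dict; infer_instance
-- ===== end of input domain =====

-- B groups by collecting the distinct lengths first and filtering per length, instead of A's
-- one-pass dict bucketing with an append/insert branch; same return value, alternative shape.

-- set(p) for a string p: the set of its characters as 1-character strings, first occurrences in order
def pySet (p : String) : List String :=
  PySem.Set.ofList (p.toList.map (fun c => String.singleton c))

-- ===== PORT A =====
def get_length_dict (patterns : List String) : List (Int × List (List String)) :=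
  (patterns.foldl (fun d p =>
      if d.contains (PySem.Str.len p) then
        d.modify (PySem.Str.len p) [] (fun l => l ++ [pySet p])
      else
        d.insert (PySem.Str.len p) [pySet p])
    PySem.Dict.empty).items

-- ===== PORT B =====
def get_length_dict_alt (patterns : List String) : List (Int × List (List String)) :=
  (PySem.List.dedup (patterns.map (fun p => PySem.Str.len p))).map
    (fun l => (l, (patterns.filter (fun p => PySem.Str.len p == l)).map pySet))

-- ===== PRECONDITION & SPEC =====
def Spec_get_length_dict (patterns : List String) (out : List (Int × List (List String))) : Prop := out = get_length_dict_alt patterns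
instance (patterns : List String) (out : List (Int × List (List String))) : Decidable (Spec_get_length_dict patterns out) := by unfold Spec_get_length_dict; infer_instance

-- ===== CLAIM (what is proved, stated in full; the proofs are below) =====
def Claim_equal_get_length_dict : Prop := ∀ (patterns : List String), Dom_get_length_dict patterns → Spec_get_length_dict patterns (get_length_dict patterns)

-- ===== LEMMAS AND PROOFS =====

-- A's if-branch (append to an existing bucket / start a new one) is exactly d[len p] = d.get(len p, []) + [set p]
theorem step_eq (d : PySem.Dict Int (List (List String))) (p : String) :
    (if d.contains (PySem.Str.len p) then
        d.modify (PySem.Str.len p) [] (fun l => l ++ [pySet p])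
      else
        d.insert (PySem.Str.len p) [pySet p])
    = d.modify (PySem.Str.len p) [] (fun l => l ++ [pySet p]) := by
  by_cases h : d.contains (PySem.Str.len p) = true
  · rw [if_pos h]
  · rw [if_neg h]
    simp only [Bool.not_eq_true] at h
    show _ = PySem.Dict.modify _ _ _ _
    unfold PySem.Dict.modify
    rw [PySem.Dict.getD_of_not_contains d [] h]
    rfl

theorem main_eq (patterns : List String) : get_length_dict patterns = get_length_dict_alt patterns := by
  unfold get_length_dict get_length_dict_alt
  have hf : (fun (d : PySem.Dict Int (List (List String))) p =>
      if d.contains (PySem.Str.len p) then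
        d.modify (PySem.Str.len p) [] (fun l => l ++ [pySet p])
      else
        d.insert (PySem.Str.len p) [pySet p])
    = fun d p => d.modify (PySem.Str.len p) [] (fun l => l ++ [pySet p]) := by
    funext d p; exact step_eq d p
  rw [hf]
  have hmap : patterns.foldl (fun d p => d.modify (PySem.Str.len p) [] (fun l => l ++ [pySet p])) PySem.Dict.empty
      = (patterns.map (fun p => (PySem.Str.len p, pySet p))).foldl
          (fun d q => d.modify q.1 [] (fun l => l ++ [q.2])) PySem.Dict.empty := by
    rw [List.foldl_map]
  rw [hmap]
  set l := patterns.map (fun p => (PySem.Str.len p, pySet p)) with hl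
  set D := l.foldl (fun d q => d.modify q.1 [] (fun v => v ++ [q.2])) PySem.Dict.empty with hD
  have hnodup : D.keys.Nodup := by
    exact PySem.Dict.nodup_keys_foldl_modify_key l Prod.fst [] (fun _ q v => v ++ [q.2]) PySem.Dict.empty (by simp [PySem.Dict.keys_empty])
  have hkeys : D.keys = PySem.Set.ofList (patterns.map (fun p => PySem.Str.len p)) := by
    rw [hD, PySem.Dict.keys_foldl_modify_key l Prod.fst [] (fun _ q v => v ++ [q.2]) PySem.Dict.empty]
    simp [hl, PySem.Set.update, PySem.Set.ofList_eq_foldl, List.map_map, Function.comp_def]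
  have hitems := PySem.Dict.items_eq_map_keys D hnodup []
  rw [hitems, hkeys]
  simp only [PySem.List.dedup_eq_ofList]
  apply List.map_congr_left
  intro k hk
  have hg := PySem.Dict.getD_foldl_modify_append l PySem.Dict.empty k
  rw [← hD] at hg
  rw [hg, hl]
  simp [List.filter_map, List.map_map, Function.comp_def]

-- ===== VERDICT (by name: the statement is the Claim_ definition above) =====
theorem get_length_dict_spec : Claim_equal_get_length_dict := by
  intro patterns _
  exact main_eq patterns
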